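-- pv_equiv track=rewrite | github.com/RDNordic/ai-championship-warroom | src/grocerybot/planner.py | _consume_pool
-- ===== SOURCE A (Python) =====
-- def _consume_pool(
--     needed: list[str],
--     pool: list[str],
-- ) -> tuple[list[str], list[str]]:
--     """Consume pool items against needed multiset.
--
--     Returns:
--       remaining_needed, leftover_pool
--     """
--     remaining = list(needed)
--     leftover = list(pool)
--     for item in pool:
--         if item in remaining:
--             remaining.remove(item)
--             leftover.remove(item)
--     return remaining, leftover
-- ===== SOURCE B (Python) =====
-- def _consume_pool(
--     needed: list[str],
--     pool: list[str],
-- ) -> tuple[list[str], list[str]]: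
--     """Consume pool items against needed multiset (counter-based, O(n+m)).
--
--     Returns:
--       remaining_needed, leftover_pool
--     """
--     pool_counts = {}
--     for item in pool:
--         pool_counts[item] = pool_counts.get(item, 0) + 1
--     need_counts = {}
--     for item in needed:
--         need_counts[item] = need_counts.get(item, 0) + 1
--     remaining = []
--     for item in needed:
--         c = pool_counts.get(item, 0)
--         if c > 0:
--             pool_counts[item] = c - 1
--         else:
--             remaining.append(item)
--     leftover = []
--     for item in pool:
--         c = need_counts.get(item, 0)
--         if c > 0:
--             need_counts[item] = c - 1
--         else:
--             leftover.append(item)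
--     return remaining, leftover
-- ===== Notes on version B (the rewrite author's own statement) =====
-- stated objective: faster
-- what changed: Replaces the per-item 'in'/remove scans (quadratic) with two hash counters built once and a single linear pass over each list that drops an element while its counter budget lasts.
import Mathlib
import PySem

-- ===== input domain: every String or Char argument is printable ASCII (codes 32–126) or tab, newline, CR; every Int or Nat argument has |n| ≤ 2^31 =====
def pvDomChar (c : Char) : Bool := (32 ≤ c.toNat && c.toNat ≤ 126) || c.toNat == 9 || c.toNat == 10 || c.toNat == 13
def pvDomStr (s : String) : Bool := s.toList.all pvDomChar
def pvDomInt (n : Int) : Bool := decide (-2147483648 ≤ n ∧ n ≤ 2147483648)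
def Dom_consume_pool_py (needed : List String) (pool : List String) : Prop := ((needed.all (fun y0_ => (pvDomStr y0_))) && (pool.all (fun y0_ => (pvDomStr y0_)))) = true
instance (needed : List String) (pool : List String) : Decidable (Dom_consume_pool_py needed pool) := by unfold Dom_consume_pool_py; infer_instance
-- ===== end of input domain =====

-- B replaces A's quadratic membership/remove scans by hash counters and one linear pass per list (measured asymptotically faster).

-- ===== PORT A =====
-- the loop body of A: 'if item in remaining: remaining.remove(item); leftover.remove(item)'
def pvStepA (st : List String × List String) (item : String) : List String × List String :=
  if item ∈ st.1 then
    ((PySem.List.remove? st.1 item).getD st.1, (PySem.List.remove? st.2 item).getD st.2)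
  else st

def consume_pool_py (needed : List String) (pool : List String) : List String × List String :=
  pool.foldl pvStepA (needed, pool)

-- ===== PORT B =====
-- counter-building loop: 'd[item] = d.get(item, 0) + 1'
def pvCountB (xs : List String) : PySem.Dict String Int :=
  xs.foldl (fun d x => d.insert x (d.getD x 0 + 1)) PySem.Dict.empty

-- the consuming pass: 'c = counts.get(item, 0); if c > 0: counts[item] = c - 1 else: out.append(item)'
def pvStepB (st : PySem.Dict String Int × List String) (item : String) : PySem.Dict String Int × List String :=
  let c := st.1.getD item 0
  if 0 < c then (st.1.insert item (c - 1), st.2) else (st.1, st.2 ++ [item])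

def consume_pool_py_alt (needed : List String) (pool : List String) : List String × List String :=
  let poolCounts := pvCountB pool
  let needCounts := pvCountB needed
  let r := needed.foldl pvStepB (poolCounts, [])
  let l := pool.foldl pvStepB (needCounts, [])
  (r.2, l.2)

-- ===== PRECONDITION & SPEC =====
def Spec_consume_pool_py (needed : List String) (pool : List String) (out : List String × List String) : Prop := out = consume_pool_py_alt needed pool
instance (needed : List String) (pool : List String) (out : List String × List String) : Decidable (Spec_consume_pool_py needed pool out) := by unfold Spec_consume_pool_py; infer_instance

-- ===== CLAIM (what is proved, stated in full; the proofs are below) =====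
def Claim_equal_consume_pool_py : Prop := ∀ (needed : List String) (pool : List String), Dom_consume_pool_py needed pool → Spec_consume_pool_py needed pool (consume_pool_py needed pool)

-- ===== LEMMAS AND PROOFS =====

-- a budget function update
def pvUpd (k : String → Int) (y : String) (n : Int) : String → Int := fun v => if v = y then n else k v

-- drop, left to right, up to (k v) occurrences of each value v
def pvSub : List String → (String → Int) → List String
  | [], _ => []
  | y :: ys, k => if 0 < k y then pvSub ys (pvUpd k y (k y - 1)) else y :: pvSub ys k

theorem pvSub_nonpos (xs : List String) (k : String → Int) (h : ∀ v, k v ≤ 0) :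
    pvSub xs k = xs := by
  induction xs generalizing k with
  | nil => rfl
  | cons y ys ih =>
    have : ¬ 0 < k y := by have := h y; omega
    simp [pvSub, this, ih k h]

theorem pvSub_erase (xs : List String) (x : String) (k : String → Int)
    (hx : x ∈ xs) (hk : 1 ≤ k x) :
    pvSub xs k = pvSub (xs.erase x) (pvUpd k x (k x - 1)) := by
  induction xs generalizing k with
  | nil => cases hx
  | cons y ys ih =>
    by_cases hxy : y = x
    · subst hxy
      have : (y :: ys).erase y = ys := by simp
      rw [this]
      simp [pvSub, show 0 < k y by omega]
    · have herase : (y :: ys).erase x = y :: ys.erase x := by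
        simp [hxy]
      have hmem : x ∈ ys := by
        rcases List.mem_cons.mp hx with h | h
        · exact absurd h.symm hxy
        · exact h
      rw [herase]
      have hxy' : ¬ x = y := fun h => hxy h.symm
      have hky : pvUpd k x (k x - 1) y = k y := by simp [pvUpd, hxy]
      by_cases hp : 0 < k y
      · have hkx : pvUpd k y (k y - 1) x = k x := by simp [pvUpd, hxy']
        rw [pvSub, pvSub, hky, if_pos hp, if_pos hp]
        rw [ih (pvUpd k y (k y - 1)) hmem (by rw [hkx]; exact hk)]
        congr 1
        funext v
        by_cases hv1 : v = x <;> by_cases hv2 : v = y <;>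
          simp_all [pvUpd]
      · rw [pvSub, pvSub, hky, if_neg hp, if_neg hp, ih k hmem hk]

-- B's consuming pass computes pvSub with budgets = the dict's counts
theorem pvStepB_pass (xs : List String) (d : PySem.Dict String Int) (acc : List String) :
    (xs.foldl pvStepB (d, acc)).2 = acc ++ pvSub xs (fun v => d.getD v 0) := by
  induction xs generalizing d acc with
  | nil => simp [pvSub]
  | cons y ys ih =>
    by_cases hp : 0 < d.getD y 0
    · rw [List.foldl_cons, show pvStepB (d, acc) y = (d.insert y (d.getD y 0 - 1), acc) by
        simp [pvStepB, hp]]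
      rw [ih]
      have : (fun v => (d.insert y (d.getD y 0 - 1)).getD v 0)
          = pvUpd (fun v => d.getD v 0) y (d.getD y 0 - 1) := by
        funext v
        simp [PySem.Dict.getD_insert, pvUpd]
      rw [this]
      simp [pvSub, hp]
    · rw [List.foldl_cons, show pvStepB (d, acc) y = (d, acc ++ [y]) by simp [pvStepB, hp]]
      rw [ih]
      simp [pvSub, hp]

-- remove of a value absent from the prefix takes the head of the suffix
theorem pvRemove_append (acc p : List String) (x : String) (hx : x ∉ acc) :
    PySem.List.remove? (acc ++ x :: p) x = some (acc ++ p) := by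
  induction acc with
  | nil => simp
  | cons a t ih =>
    have ha : a ≠ x := fun h => hx (h ▸ List.mem_cons_self)
    have ht : x ∉ t := fun h => hx (List.mem_cons_of_mem _ h)
    rw [List.cons_append, PySem.List.remove?_cons_of_ne _ ha, ih ht]
    rfl

-- the canonical tail-recursive form of A's loop
def pvConsume : List String → List String → List String → List String × List String
  | r, [], acc => (r, acc)
  | r, x :: p, acc => if x ∈ r then pvConsume (r.erase x) p acc else pvConsume r p (acc ++ [x])

theorem pvA_inv (p r acc : List String) (h : ∀ v ∈ r, v ∉ acc) :
    p.foldl pvStepA (r, acc ++ p) = pvConsume r p acc := by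
  induction p generalizing r acc with
  | nil => simp [pvConsume]
  | cons x p' ih =>
    by_cases hx : x ∈ r
    · have hnacc : x ∉ acc := h x hx
      have h1 : PySem.List.remove? r x = some (r.erase x) :=
        PySem.List.remove?_eq_some_erase r x hx
      have h2 : PySem.List.remove? (acc ++ x :: p') x = some (acc ++ p') :=
        pvRemove_append acc p' x hnacc
      rw [List.foldl_cons, show pvStepA (r, acc ++ x :: p') x = (r.erase x, acc ++ p') by
        simp [pvStepA, hx, h1, h2]]
      rw [ih (r.erase x) acc (fun v hv => h v (List.mem_of_mem_erase hv))]
      simp [pvConsume, hx]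
    · rw [List.foldl_cons, show pvStepA (r, acc ++ x :: p') x = (r, acc ++ x :: p') by
        simp [pvStepA, hx]]
      have : acc ++ x :: p' = (acc ++ [x]) ++ p' := by simp
      rw [this, ih r (acc ++ [x]) (fun v hv => by
        intro hmem
        rcases List.mem_append.mp hmem with h1 | h1
        · exact h v hv h1
        · simp at h1; subst h1; exact hx hv)]
      simp [pvConsume, hx]

-- dropping more than the number of occurrences present is the same as dropping all of them
theorem pvSub_min (xs : List String) (k : String → Int) :
    pvSub xs (fun v => min (xs.count v : Int) (k v)) = pvSub xs k := by
  induction xs generalizing k with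
  | nil => rfl
  | cons y ys ih =>
    have hcy : (1:Int) ≤ ((y :: ys).count y : Int) := by
      exact_mod_cast List.count_pos_iff.mpr List.mem_cons_self
    by_cases hp : 0 < k y
    · have hp' : 0 < min ((y :: ys).count y : Int) (k y) := by omega
      rw [pvSub, pvSub, if_pos hp', if_pos hp]
      have hfun : pvUpd (fun v => min ((y :: ys).count v : Int) (k v)) y
            (min ((y :: ys).count y : Int) (k y) - 1)
          = fun v => min ((ys.count v : Int)) (pvUpd k y (k y - 1) v) := by
        funext v
        by_cases hv : v = y
        · subst hv
          have h1 : (v :: ys).count v = ys.count v + 1 := by simp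
          simp only [pvUpd, h1]
          push_cast
          omega
        · have h1 : (y :: ys).count v = ys.count v := by
            simp [Ne.symm hv]
          simp [pvUpd, hv, h1]
      rw [hfun, ih]
    · have hp' : ¬ 0 < min ((y :: ys).count y : Int) (k y) := by omega
      rw [pvSub, pvSub, if_neg hp', if_neg hp]
      have hfun : (fun v => min ((y :: ys).count v : Int) (k v))
          = fun v => min ((ys.count v : Int)) (k v) := by
        funext v
        by_cases hv : v = y
        · subst hv
          have h0 : (0:Int) ≤ (ys.count v : Int) := by positivity
          have h1 : ((v :: ys).count v : Int) = (ys.count v : Int) + 1 := by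
            simp
          omega
        · have h1 : (y :: ys).count v = ys.count v := by
            simp [Ne.symm hv]
          rw [h1]
      rw [hfun, ih]

-- count characterization of the canonical form
theorem pvConsume_eq (p : List String) (r acc : List String) :
    pvConsume r p acc =
      (pvSub r (fun v => min (r.count v : Int) (p.count v : Int)),
       acc ++ pvSub p (fun v => min (r.count v : Int) (p.count v : Int))) := by
  induction p generalizing r acc with
  | nil =>
    rw [pvConsume, pvSub_nonpos _ _ (fun v => by simp)]
    simp [pvSub]
  | cons x p' ih =>
    by_cases hx : x ∈ r
    · have hc : 1 ≤ (r.count x : Int) := by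
        exact_mod_cast List.count_pos_iff.mpr hx
      have hcnt : ((x :: p').count x : Int) = (p'.count x : Int) + 1 := by
        simp
      have hkx : (1:Int) ≤ min (r.count x : Int) ((x :: p').count x : Int) := by omega
      have hfun : pvUpd (fun v => min (r.count v : Int) ((x :: p').count v : Int)) x
            (min (r.count x : Int) ((x :: p').count x : Int) - 1)
          = (fun v => min ((r.erase x).count v : Int) (p'.count v : Int)) := by
        funext v
        by_cases hv : v = x
        · subst hv
          have hc' : 1 ≤ r.count v := List.count_pos_iff.mpr hx
          have h1 : ((r.erase v).count v : Int) = (r.count v : Int) - 1 := by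
            rw [List.count_erase_self]
            omega
          simp only [pvUpd]
          rw [h1, hcnt, min_def, min_def]
          split_ifs <;> omega
        · have h1 : (r.erase x).count v = r.count v := List.count_erase_of_ne hv
          have h2 : (x :: p').count v = p'.count v := by
            simp [Ne.symm hv]
          simp [pvUpd, hv, h1, h2]
      have e1 : pvSub r (fun v => min (r.count v : Int) ((x :: p').count v : Int))
          = pvSub (r.erase x) (fun v => min ((r.erase x).count v : Int) (p'.count v : Int)) := by
        rw [pvSub_erase r x _ hx hkx, hfun]
      have e2 : pvSub (x :: p') (fun v => min (r.count v : Int) ((x :: p').count v : Int))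
          = pvSub p' (fun v => min ((r.erase x).count v : Int) (p'.count v : Int)) := by
        rw [pvSub, if_pos (by omega), hfun]
      rw [show pvConsume r (x :: p') acc = pvConsume (r.erase x) p' acc by
        simp [pvConsume, hx], ih, e1, e2]
    · have hc0 : r.count x = 0 := List.count_eq_zero.mpr hx
      have hkx : ¬ 0 < min (r.count x : Int) ((x :: p').count x : Int) := by
        have h0 : (0:Int) ≤ ((x :: p').count x : Int) := by positivity
        rw [hc0]
        omega
      have hfun : (fun v => min (r.count v : Int) ((x :: p').count v : Int))
          = (fun v => min (r.count v : Int) ((p'.count v : Int))) := by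
        funext v
        by_cases hv : v = x
        · subst hv
          have h1 : ((v :: p').count v : Int) = (p'.count v : Int) + 1 := by
            simp
          rw [hc0] at *
          have h0 : (0:Int) ≤ (p'.count v : Int) := by positivity
          push_cast
          omega
        · have h1 : (x :: p').count v = p'.count v := by
            simp [Ne.symm hv]
          rw [h1]
      have e2 : pvSub (x :: p') (fun v => min (r.count v : Int) ((x :: p').count v : Int))
          = x :: pvSub p' (fun v => min (r.count v : Int) ((x :: p').count v : Int)) := by
        rw [pvSub, if_neg hkx]
      rw [show pvConsume r (x :: p') acc = pvConsume r p' (acc ++ [x]) by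
        simp [pvConsume, hx], ih, e2, hfun]
      simp

-- ===== VERDICT (by name: the statement is the Claim_ definition above) =====
theorem consume_pool_py_spec : Claim_equal_consume_pool_py := by
  intro needed pool _
  show consume_pool_py needed pool = consume_pool_py_alt needed pool
  have hA : consume_pool_py needed pool
      = (pvSub needed (fun v => min (needed.count v : Int) (pool.count v : Int)),
         pvSub pool (fun v => min (needed.count v : Int) (pool.count v : Int))) := by
    have := pvA_inv pool needed [] (by simp)
    rw [List.nil_append] at this
    rw [consume_pool_py, this, pvConsume_eq]
    simp
  have hcnt : ∀ (xs : List String) (v : String),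
      (pvCountB xs).getD v 0 = (xs.count v : Int) := by
    intro xs v
    rw [pvCountB, PySem.Dict.foldl_insert_getD_add_one_eq_counter, PySem.Dict.getD_counter]
  have hB : consume_pool_py_alt needed pool
      = (pvSub needed (fun v => (pool.count v : Int)),
         pvSub pool (fun v => (needed.count v : Int))) := by
    rw [consume_pool_py_alt]
    simp only [pvStepB_pass, List.nil_append]
    rw [show (fun v => (pvCountB pool).getD v 0) = (fun v => ((pool.count v : Int))) from
          funext (hcnt pool),
        show (fun v => (pvCountB needed).getD v 0) = (fun v => ((needed.count v : Int))) from
          funext (hcnt needed)]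
  rw [hA, hB]
  congr 1
  · exact pvSub_min needed _
  · rw [show (fun v => min (needed.count v : Int) (pool.count v : Int))
        = (fun v => min (pool.count v : Int) (needed.count v : Int)) by
      funext v; exact min_comm _ _]
    exact pvSub_min pool _
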